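-- pv_equiv track=rewrite | github.com/szufix/mapel | mapel-roommates/src/mapel/roommates/features/basic_features.py | number_blockingPairs
-- ===== SOURCE A (Python) =====
-- def number_blockingPairs(instance,matching):
--     bps = 0
--     num_agents = len(instance)
--     for i in range(num_agents):
--         for j in range(i+1,num_agents):
--             if i == j:
--                 continue
--
--             partner_i = matching[i]
--             partner_j = matching[j]
--             partneri_index = get_rank(instance, i, partner_i)
--             partnerj_index = get_rank(instance, j, partner_j)
--
--             if num_agents-1 in [partneri_index, partnerj_index]:
--                 bps += 1
--                 continue
--
--             if get_rank(instance, i, j) < partneri_index: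
--                 if get_rank(instance, j, i) < partnerj_index:
--                     bps += 1
--     return bps
--
-- def get_rank(matrix, a1, a2):
--         '''
--             Returns the rank of a2 in the a1's preference list
--             if not present, return len(matrix)-1 (one more than max value)
--         '''
--         for i, lst in enumerate(matrix[a1]):
--             if a2 in lst:
--                 return i
--         return len(matrix)-1
-- ===== SOURCE B (Python) =====
-- def number_blockingPairs(instance, matching):
--     n = len(instance)
--     if n < 2:
--         return 0
--     # one pass: rank dict per agent (agent -> index of first group containing it)
--     rank = []
--     for prefs in instance:
--         r = {}
--         for idx, lst in enumerate(prefs):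
--             for a in lst:
--                 if a not in r:
--                     r[a] = idx
--         rank.append(r)
--     pr = [rank[i].get(matching[i], n - 1) for i in range(n)]
--     unflagged = [i for i in range(n) if pr[i] != n - 1]
--     u = len(unflagged)
--     # every pair touching a flagged agent is blocking: closed form
--     bps = n * (n - 1) // 2 - u * (u - 1) // 2
--     # mutual-preference pairs among unflagged agents, via the rank dicts
--     rest = unflagged
--     while rest:
--         i = rest[0]
--         rest = rest[1:]
--         for j in rest:
--             if rank[i].get(j, n - 1) < pr[i] and rank[j].get(i, n - 1) < pr[j]:
--                 bps += 1
--     return bps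
-- ===== Notes on version B (the rewrite author's own statement) =====
-- stated objective: faster
-- what changed: B precomputes one first-occurrence rank dict per agent and each agent's partner rank in a single pass, counts all pairs touching a last-ranked/absent-partner agent by the closed form C(n,2)-C(u,2), and then counts mutual-preference pairs only among the unflagged agents via dict lookups, instead of A's re-scanning the preference lists with get_rank for every one of the C(n,2) pairs.
import Mathlib
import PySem

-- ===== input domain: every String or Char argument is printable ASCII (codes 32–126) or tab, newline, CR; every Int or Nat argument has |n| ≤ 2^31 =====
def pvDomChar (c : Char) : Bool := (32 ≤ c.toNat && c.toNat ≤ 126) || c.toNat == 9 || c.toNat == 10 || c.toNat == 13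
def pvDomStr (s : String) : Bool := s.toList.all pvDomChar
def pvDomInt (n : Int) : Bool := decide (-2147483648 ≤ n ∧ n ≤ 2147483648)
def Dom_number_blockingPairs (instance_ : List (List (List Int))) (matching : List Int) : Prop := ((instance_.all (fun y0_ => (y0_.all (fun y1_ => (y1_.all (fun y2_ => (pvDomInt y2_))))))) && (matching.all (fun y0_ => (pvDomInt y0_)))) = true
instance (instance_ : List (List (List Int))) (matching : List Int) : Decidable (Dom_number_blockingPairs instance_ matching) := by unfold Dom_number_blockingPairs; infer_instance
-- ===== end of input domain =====

-- B replaces A's per-pair get_rank rescans by one precomputed rank dict per agent, a closed-form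
-- count C(n,2)-C(u,2) for pairs touching a flagged (last-ranked/absent partner) agent, and a
-- mutual-preference scan over the unflagged agents only (objective: faster).

-- ===== PORT A =====
-- get_rank: scan enumerate(matrix[a1]) for the first group containing a2; else len(matrix)-1
def getRankScan (pairs : List (Int × List Int)) (a2 : Int) (dflt : Int) : Int :=
  match pairs with
  | [] => dflt
  | (idx, lst) :: rest => if lst.contains a2 then idx else getRankScan rest a2 dflt

-- matrix[a1] is always in range at A's call sites (a1 ∈ range(len(matrix))), so the [] default never fires
def get_rank (matrix : List (List (List Int))) (a1 a2 : Int) : Int :=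
  getRankScan (PySem.List.enumerate (PySem.List.pyGetD matrix a1 [])) a2 ((matrix.length : Int) - 1)

def number_blockingPairs (instance_ : List (List (List Int))) (matching : List Int) : Int :=
  let num_agents := instance_.length
  (PySem.List.pyRange 0 (num_agents : Int)).foldl (fun bps i =>
    (PySem.List.pyRange (i + 1) (num_agents : Int)).foldl (fun bps j =>
      if i = j then bps  -- 'continue' (unreachable: j > i)
      else
        -- matching[i] / matching[j]: the IndexError case (.getD default) is excluded by Pre_
        let partner_i := PySem.List.pyGetD matching i 0
        let partner_j := PySem.List.pyGetD matching j 0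
        let partneri_index := get_rank instance_ i partner_i
        let partnerj_index := get_rank instance_ j partner_j
        if (num_agents : Int) - 1 = partneri_index ∨ (num_agents : Int) - 1 = partnerj_index then
          bps + 1
        else if get_rank instance_ i j < partneri_index then
          if get_rank instance_ j i < partnerj_index then bps + 1 else bps
        else bps) bps) 0

-- ===== PORT B =====
-- first-occurrence rank dict for one agent's preference groups ('if a not in r: r[a] = idx')
def buildRank (prefs : List (List Int)) : PySem.Dict Int Int :=
  (PySem.List.enumerate prefs).foldl (fun r p =>
    p.2.foldl (fun r a => if r.contains a then r else r.insert a p.1) r) PySem.Dict.empty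

-- 'while rest: i = rest[0]; rest = rest[1:]; for j in rest: …'
def mutLoop (rank : List (PySem.Dict Int Int)) (pr : List Int) (n : Nat) : List Int → Int → Int
  | [], bps => bps
  | i :: rest, bps =>
      mutLoop rank pr n rest
        (rest.foldl (fun bps j =>
          if (PySem.List.pyGetD rank i PySem.Dict.empty).getD j ((n : Int) - 1) < PySem.List.pyGetD pr i 0 ∧
             (PySem.List.pyGetD rank j PySem.Dict.empty).getD i ((n : Int) - 1) < PySem.List.pyGetD pr j 0
          then bps + 1 else bps) bps)

def number_blockingPairs_alt (instance_ : List (List (List Int))) (matching : List Int) : Int :=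
  let n := instance_.length
  if n < 2 then 0
  else
    let rank := instance_.foldl (fun acc prefs => acc ++ [buildRank prefs]) []
    -- matching[i]: the IndexError case (.getD default) is excluded by Pre_; rank[i], pr[i] are always in range
    let pr := (PySem.List.pyRange 0 (n : Int)).map (fun i =>
      (PySem.List.pyGetD rank i PySem.Dict.empty).getD (PySem.List.pyGetD matching i 0) ((n : Int) - 1))
    let unflagged := (PySem.List.pyRange 0 (n : Int)).filter (fun i => PySem.List.pyGetD pr i 0 ≠ (n : Int) - 1)
    let u := unflagged.length
    let bps := PySem.Int.floordiv ((n : Int) * ((n : Int) - 1)) 2 -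
               PySem.Int.floordiv ((u : Int) * ((u : Int) - 1)) 2
    mutLoop rank pr n unflagged bps

-- ===== PRECONDITION & SPEC =====
-- Pre_ excludes exactly the inputs where both Pythons raise IndexError (matching shorter than the
-- agent list while at least one pair is inspected); on them neither program returns.
def Pre_number_blockingPairs (instance_ : List (List (List Int))) (matching : List Int) : Prop :=
  instance_.length ≤ 1 ∨ instance_.length ≤ matching.length
instance (instance_ : List (List (List Int))) (matching : List Int) : Decidable (Pre_number_blockingPairs instance_ matching) := by unfold Pre_number_blockingPairs; infer_instance

def pvWitness_number_blockingPairs : List (List (List Int)) × List Int := ([[[1]], [[0]]], [1, 0])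

def Spec_number_blockingPairs (instance_ : List (List (List Int))) (matching : List Int) (out : Int) : Prop := out = number_blockingPairs_alt instance_ matching
instance (instance_ : List (List (List Int))) (matching : List Int) (out : Int) : Decidable (Spec_number_blockingPairs instance_ matching out) := by unfold Spec_number_blockingPairs; infer_instance

-- ===== CLAIM (what is proved, stated in full; the proofs are below) =====
def Claim_equal_number_blockingPairs : Prop := ∀ (instance_ : List (List (List Int))) (matching : List Int), Dom_number_blockingPairs instance_ matching → Pre_number_blockingPairs instance_ matching → Spec_number_blockingPairs instance_ matching (number_blockingPairs instance_ matching)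

-- ===== LEMMAS AND PROOFS =====

-- shared abstractions: partner rank, flag, mutual-preference indicator
def prFn (instance_ : List (List (List Int))) (matching : List Int) (i : Int) : Int :=
  get_rank instance_ i (PySem.List.pyGetD matching i 0)

def flagFn (instance_ : List (List (List Int))) (matching : List Int) (i : Int) : Bool :=
  decide ((instance_.length : Int) - 1 = prFn instance_ matching i)

def mutFn (instance_ : List (List (List Int))) (matching : List Int) (i j : Int) : Int :=
  if get_rank instance_ i j < prFn instance_ matching i ∧
     get_rank instance_ j i < prFn instance_ matching j then 1 else 0

def gAFn (instance_ : List (List (List Int))) (matching : List Int) (i j : Int) : Int :=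
  if i = j then 0
  else if (instance_.length : Int) - 1 = prFn instance_ matching i ∨
          (instance_.length : Int) - 1 = prFn instance_ matching j then 1
  else mutFn instance_ matching i j

-- sum of g over ordered pairs of a list (each earlier element with each later one)
def pairSum (l : List Int) (g : Int → Int → Int) : Int :=
  match l with
  | [] => 0
  | x :: xs => (xs.map (g x)).sum + pairSum xs g

-- dict-building invariants (insert-if-absent loop over one group)
theorem foldl_insAbs_contains (lst : List Int) (r : PySem.Dict Int Int) (idx a2 : Int) :
    (lst.foldl (fun r a => if r.contains a then r else r.insert a idx) r).contains a2
      = (r.contains a2 || lst.contains a2) := by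
  induction lst generalizing r with
  | nil => simp
  | cons a as ih =>
    simp only [List.foldl_cons, List.contains_cons, ih]
    by_cases h2 : a2 = a
    · subst h2
      by_cases h : r.contains a2 = true
      · simp [h]
      · simp [h]
    · by_cases h : r.contains a = true <;>
        by_cases hc : r.contains a2 = true <;>
        simp [h, hc, PySem.Dict.contains_insert, h2]

theorem foldl_insAbs_getD (lst : List Int) (r : PySem.Dict Int Int) (idx a2 d : Int) :
    (lst.foldl (fun r a => if r.contains a then r else r.insert a idx) r).getD a2 d
      = if r.contains a2 then r.getD a2 d else if lst.contains a2 then idx else d := by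
  induction lst generalizing r with
  | nil =>
    simp only [List.foldl_nil, List.contains_nil]
    by_cases h : r.contains a2 = true
    · simp [h]
    · simp [h, PySem.Dict.getD_of_not_contains r d (by simpa using h)]
  | cons a as ih =>
    simp only [List.foldl_cons, List.contains_cons, ih]
    by_cases h2 : a2 = a
    · subst h2
      by_cases h : r.contains a2 = true
      · simp [h]
      · simp [h]
    · by_cases h : r.contains a = true <;>
        by_cases hc : r.contains a2 = true <;>
        simp [h, hc, PySem.Dict.contains_insert, PySem.Dict.getD_insert, h2]

theorem foldl_groups_getD (ps : List (Int × List Int)) (r : PySem.Dict Int Int) (a2 d : Int) :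
    (ps.foldl (fun r p => p.2.foldl (fun r a => if r.contains a then r else r.insert a p.1) r) r).getD a2 d
      = if r.contains a2 then r.getD a2 d else getRankScan ps a2 d := by
  induction ps generalizing r with
  | nil =>
    simp only [List.foldl_nil, getRankScan]
    by_cases h : r.contains a2 = true
    · simp [h]
    · simp [h, PySem.Dict.getD_of_not_contains r d (by simpa using h)]
  | cons p rest ih =>
    obtain ⟨idx, lst⟩ := p
    simp only [List.foldl_cons, ih, getRankScan]
    rw [foldl_insAbs_contains, foldl_insAbs_getD]
    by_cases hr : r.contains a2 = true <;> by_cases hm : a2 ∈ lst <;> simp [hr, hm]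

-- B's dict lookup computes A's get_rank scan
theorem buildRank_getD (prefs : List (List Int)) (a2 d : Int) :
    (buildRank prefs).getD a2 d = getRankScan (PySem.List.enumerate prefs) a2 d := by
  rw [buildRank, foldl_groups_getD]
  simp

theorem pyRange_nil {a n : Int} (h : n ≤ a) : PySem.List.pyRange a n = [] := by
  simp [PySem.List.pyRange]; omega

-- indexing helper: element of map over pyRange 0 n at an Int index inside the range
theorem pyGetD_map_pyRange_int {β : Type} (f : Int → β) (n : Nat) (d : β) {i : Int}
    (h0 : 0 ≤ i) (h1 : i < (n : Int)) :
    PySem.List.pyGetD ((PySem.List.pyRange 0 (n : Int)).map f) i d = f i := by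
  have hi : i = ((i.toNat : Nat) : Int) := by omega
  rw [hi]
  exact PySem.List.pyGetD_map_pyRange f n i.toNat d (by omega)

-- B's rank list element = buildRank of A's matrix row
theorem rank_at (instance_ : List (List (List Int))) {i : Int}
    (h0 : 0 ≤ i) (h1 : i < (instance_.length : Int)) :
    PySem.List.pyGetD (instance_.map buildRank) i PySem.Dict.empty
      = buildRank (PySem.List.pyGetD instance_ i []) := by
  rw [PySem.List.pyGetD_eq_getElem _ _ h0 (by simpa using h1),
      PySem.List.pyGetD_eq_getElem _ _ h0 (by exact_mod_cast h1)]
  simp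

theorem pyRange_pairwise_lt (n : Nat) : (PySem.List.pyRange 0 (n : Int)).Pairwise (· < ·) := by
  rw [PySem.List.pyRange_zero_natCast]
  exact List.pairwise_lt_range.map _ (by intro a b h; exact_mod_cast h)

-- generic: a nested range loop accumulating over later indices is a pairSum
theorem foldl_pairSum (F : Int → Int → Int) (g : Int → Int → Int) (n : Int)
    (hF : ∀ acc i, F acc i = acc + ((PySem.List.pyRange (i + 1) n).map (g i)).sum) :
    ∀ (k : Nat) (a acc : Int), n ≤ a + k →
      (PySem.List.pyRange a n).foldl F acc = acc + pairSum (PySem.List.pyRange a n) g := by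
  intro k
  induction k with
  | zero => intro a acc h; rw [pyRange_nil (by omega)]; simp [pairSum]
  | succ k ih =>
    intro a acc h
    by_cases ha : a < n
    · rw [PySem.List.pyRange_one_cons ha]
      simp only [List.foldl_cons, pairSum]
      rw [ih (a + 1) (F acc a) (by omega), hF]
      ring
    · rw [pyRange_nil (by omega)]; simp [pairSum]

-- A's double loop as a pairSum of gAFn
theorem A_eq_pairSum (instance_ : List (List (List Int))) (matching : List Int) :
    number_blockingPairs instance_ matching
      = pairSum (PySem.List.pyRange 0 (instance_.length : Int)) (gAFn instance_ matching) := by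
  simp only [number_blockingPairs]
  refine ((foldl_pairSum _ (gAFn instance_ matching) _ ?_ instance_.length 0 0 (by omega)).trans
    (zero_add _))
  intro acc i
  have hbody : (fun (bps j : Int) =>
      if i = j then bps
      else
        if (instance_.length : Int) - 1 = get_rank instance_ i (PySem.List.pyGetD matching i 0) ∨
           (instance_.length : Int) - 1 = get_rank instance_ j (PySem.List.pyGetD matching j 0) then
          bps + 1
        else if get_rank instance_ i j < get_rank instance_ i (PySem.List.pyGetD matching i 0) then
          if get_rank instance_ j i < get_rank instance_ j (PySem.List.pyGetD matching j 0) then bps + 1 else bps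
        else bps)
      = (fun (bps j : Int) => bps + gAFn instance_ matching i j) := by
    funext bps j
    simp only [gAFn, mutFn, prFn]
    split_ifs <;> omega
  rw [hbody, PySem.List.foldl_add]

-- B's mutual loop as a pairSum
theorem mutLoop_eq_pairSum (rank : List (PySem.Dict Int Int)) (pr : List Int) (n : Nat) :
    ∀ (l : List Int) (acc : Int),
      mutLoop rank pr n l acc
        = acc + pairSum l (fun i j =>
            if (PySem.List.pyGetD rank i PySem.Dict.empty).getD j ((n : Int) - 1) < PySem.List.pyGetD pr i 0 ∧
               (PySem.List.pyGetD rank j PySem.Dict.empty).getD i ((n : Int) - 1) < PySem.List.pyGetD pr j 0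
            then 1 else 0) := by
  intro l
  induction l with
  | nil => intro acc; simp [mutLoop, pairSum]
  | cons i rest ih =>
    intro acc
    have hbody : (fun (bps j : Int) =>
        if (PySem.List.pyGetD rank i PySem.Dict.empty).getD j ((n : Int) - 1) < PySem.List.pyGetD pr i 0 ∧
           (PySem.List.pyGetD rank j PySem.Dict.empty).getD i ((n : Int) - 1) < PySem.List.pyGetD pr j 0
        then bps + 1 else bps)
        = (fun (bps j : Int) => bps +
            if (PySem.List.pyGetD rank i PySem.Dict.empty).getD j ((n : Int) - 1) < PySem.List.pyGetD pr i 0 ∧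
               (PySem.List.pyGetD rank j PySem.Dict.empty).getD i ((n : Int) - 1) < PySem.List.pyGetD pr j 0
            then 1 else 0) := by
      funext bps j; split_ifs <;> omega
    simp only [mutLoop, pairSum]
    rw [ih, hbody, PySem.List.foldl_add]
    ring

-- pairSum only looks at ordered pairs of members
theorem pairSum_congr {l : List Int} {f g : Int → Int → Int} (hl : l.Pairwise (· < ·))
    (h : ∀ i j, i ∈ l → j ∈ l → i < j → f i j = g i j) : pairSum l f = pairSum l g := by
  induction l with
  | nil => rfl
  | cons x xs ih =>
    rcases List.pairwise_cons.mp hl with ⟨hx, hxs⟩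
    simp only [pairSum]
    congr 1
    · apply congrArg
      apply List.map_congr_left
      intro j hj
      exact h x j (by simp) (by simp [hj]) (hx j hj)
    · exact ih hxs (fun i j hi hj hij => h i j (by simp [hi]) (by simp [hj]) hij)

theorem choose_two_succ (k : Nat) : (k + 1).choose 2 = k.choose 2 + k := by
  simp [Nat.choose_succ_succ, Nat.choose_one_right]; omega

theorem sum_map_if_flag (fb : Int → Bool) (m : Int → Int) (xs : List Int) :
    (xs.map (fun j => if fb j then (1 : Int) else m j)).sum
      = (xs.countP fb : Int) + ((xs.filter (fun j => !fb j)).map m).sum := by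
  induction xs with
  | nil => simp
  | cons x xs ih =>
    by_cases h : fb x <;> simp [h, ih] <;> ring

-- the counting argument: pairs touching a flagged element vs. C(|l|,2) − C(|unflagged|,2)
theorem pairSum_flag_split (fb : Int → Bool) (m : Int → Int → Int) (l : List Int) :
    pairSum l (fun i j => if fb i || fb j then 1 else m i j)
      = ((l.length.choose 2 : Int) - (((l.filter (fun i => !fb i)).length.choose 2 : Int)))
        + pairSum (l.filter (fun i => !fb i)) m := by
  induction l with
  | nil => simp [pairSum]
  | cons x xs ih =>
    have hcount : xs.countP fb + xs.countP (fun j => !fb j) = xs.length := by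
      simpa using (List.length_eq_countP_add_countP (p := fb) (l := xs)).symm
    have hlen : (xs.filter (fun j => !fb j)).length = xs.countP (fun j => !fb j) := by
      simp [List.countP_eq_length_filter]
    by_cases h : fb x
    · have hf : List.filter (fun i => !fb i) (x :: xs) = List.filter (fun i => !fb i) xs := by
        simp [h]
      have e1 : (xs.map (fun j => if fb x || fb j then (1:Int) else m x j)).sum
          = (xs.length : Int) := by
        rw [List.map_congr_left (g := fun _ => (1:Int)) (fun j _ => by simp [h])]
        simp
      rw [show pairSum (x :: xs) (fun i j => if fb i || fb j then 1 else m i j)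
            = (xs.map (fun j => if fb x || fb j then (1:Int) else m x j)).sum
              + pairSum xs (fun i j => if fb i || fb j then 1 else m i j) from rfl,
          e1, ih, hf, List.length_cons, choose_two_succ]
      push_cast
      ring
    · have hf : List.filter (fun i => !fb i) (x :: xs) = x :: List.filter (fun i => !fb i) xs := by
        simp [h]
      have e1 : (xs.map (fun j => if fb x || fb j then (1:Int) else m x j)).sum
          = (xs.countP fb : Int) + ((xs.filter (fun j => !fb j)).map (m x)).sum := by
        rw [List.map_congr_left (g := fun j => if fb j then (1:Int) else m x j)
              (fun j _ => by simp [h])]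
        exact sum_map_if_flag fb (m x) xs
      rw [show pairSum (x :: xs) (fun i j => if fb i || fb j then 1 else m i j)
            = (xs.map (fun j => if fb x || fb j then (1:Int) else m x j)).sum
              + pairSum xs (fun i j => if fb i || fb j then 1 else m i j) from rfl,
          e1, ih, hf, List.length_cons,
          show pairSum (x :: List.filter (fun i => !fb i) xs) m
            = ((List.filter (fun i => !fb i) xs).map (m x)).sum
              + pairSum (List.filter (fun i => !fb i) xs) m from rfl,
          choose_two_succ]
      simp only [List.length_cons]
      rw [choose_two_succ ((List.filter (fun i => !fb i) xs).length)]
      have hc : (xs.countP fb : Int)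
          = (xs.length : Int) - ((xs.filter (fun j => !fb j)).length : Int) := by
        omega
      rw [hc]
      push_cast
      ring

theorem floordiv_choose_two (k : Nat) :
    PySem.Int.floordiv ((k : Int) * ((k : Int) - 1)) 2 = (k.choose 2 : Int) := by
  rw [PySem.Int.floordiv_eq_ediv_of_pos (by norm_num)]
  induction k with
  | zero => simp
  | succ m ih =>
    rw [choose_two_succ]
    push_cast
    rw [show ((m:Int) + 1) * ((m:Int) + 1 - 1) = (m:Int) * ((m:Int) - 1) + (m:Int) * 2 by ring,
        Int.add_mul_ediv_right _ _ (by norm_num : (2:Int) ≠ 0), ih]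

theorem pyRange_length (n : Nat) : (PySem.List.pyRange 0 (n : Int)).length = n := by
  rw [PySem.List.pyRange_zero_natCast]; simp

-- ===== VERDICT (by name: the statement is the Claim_ definition above) =====
theorem B_small (instance_ : List (List (List Int))) (matching : List Int)
    (h : instance_.length < 2) : number_blockingPairs_alt instance_ matching = 0 := by
  simp only [number_blockingPairs_alt]
  rw [if_pos h]

theorem A_small (instance_ : List (List (List Int))) (matching : List Int)
    (h : instance_.length < 2) : number_blockingPairs instance_ matching = 0 := by
  rw [A_eq_pairSum]
  interval_cases hn : instance_.length
  · rw [show ((0:Nat):Int) = 0 by norm_num, pyRange_nil le_rfl]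
    rfl
  · rw [show ((1:Nat):Int) = 1 by norm_num, PySem.List.pyRange_one_cons (by norm_num),
        pyRange_nil (by norm_num)]
    simp [pairSum]

theorem number_blockingPairs_spec : Claim_equal_number_blockingPairs := by
  unfold Claim_equal_number_blockingPairs Spec_number_blockingPairs
  intro instance_ matching _ _
  by_cases hsmall : instance_.length < 2
  · rw [A_small instance_ matching hsmall, B_small instance_ matching hsmall]
  · -- shorthand
    set n := instance_.length with hn
    -- per-member facts on [0, n)
    have hrank : ∀ i : Int, 0 ≤ i → i < (n : Int) → ∀ a2 : Int,
        (PySem.List.pyGetD (instance_.map buildRank) i PySem.Dict.empty).getD a2 ((n : Int) - 1)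
          = get_rank instance_ i a2 := by
      intro i h0 h1 a2
      rw [rank_at instance_ h0 h1, buildRank_getD]
      rfl
    have hpr : ∀ i : Int, 0 ≤ i → i < (n : Int) →
        PySem.List.pyGetD
          ((PySem.List.pyRange 0 (n : Int)).map (fun i =>
            (PySem.List.pyGetD (instance_.map buildRank) i PySem.Dict.empty).getD
              (PySem.List.pyGetD matching i 0) ((n : Int) - 1))) i 0
          = prFn instance_ matching i := by
      intro i h0 h1
      rw [pyGetD_map_pyRange_int _ n _ h0 h1, hrank i h0 h1]
      rfl
    -- B unfolded
    rw [number_blockingPairs_alt]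
    rw [show instance_.foldl (fun acc prefs => acc ++ [buildRank prefs]) []
          = instance_.map buildRank by
        rw [PySem.List.foldl_append_singleton_eq_map]; rfl]
    rw [mutLoop_eq_pairSum]
    -- name the pieces
    set prL := (PySem.List.pyRange 0 (n : Int)).map (fun i =>
      (PySem.List.pyGetD (instance_.map buildRank) i PySem.Dict.empty).getD
        (PySem.List.pyGetD matching i 0) ((n : Int) - 1)) with hprL
    -- B's unflagged list is the flag-filter of the range
    have hfilter : (PySem.List.pyRange 0 (n : Int)).filter
          (fun i => PySem.List.pyGetD prL i 0 ≠ (n : Int) - 1)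
        = (PySem.List.pyRange 0 (n : Int)).filter (fun i => !flagFn instance_ matching i) := by
      apply List.filter_congr
      intro i hi
      rcases PySem.List.mem_pyRange_one.mp hi with ⟨h0, h1⟩
      rw [hprL, hpr i h0 h1]
      simp [flagFn, eq_comm, ← hn]
    rw [hfilter]
    -- B's mutual indicator agrees with mutFn on members of the filtered range
    have hmut : pairSum ((PySem.List.pyRange 0 (n : Int)).filter (fun i => !flagFn instance_ matching i))
          (fun i j =>
            if (PySem.List.pyGetD (instance_.map buildRank) i PySem.Dict.empty).getD j ((n : Int) - 1)
                 < PySem.List.pyGetD prL i 0 ∧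
               (PySem.List.pyGetD (instance_.map buildRank) j PySem.Dict.empty).getD i ((n : Int) - 1)
                 < PySem.List.pyGetD prL j 0
            then 1 else 0)
        = pairSum ((PySem.List.pyRange 0 (n : Int)).filter (fun i => !flagFn instance_ matching i))
            (mutFn instance_ matching) := by
      apply pairSum_congr ((pyRange_pairwise_lt n).filter _)
      intro i j hi hj _
      rcases PySem.List.mem_pyRange_one.mp (List.mem_of_mem_filter hi) with ⟨hi0, hi1⟩
      rcases PySem.List.mem_pyRange_one.mp (List.mem_of_mem_filter hj) with ⟨hj0, hj1⟩
      rw [hprL, hpr i hi0 hi1, hpr j hj0 hj1, hrank i hi0 hi1, hrank j hj0 hj1]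
      rfl
    rw [hmut]
    -- A as a pairSum, flag-or form, then split
    rw [A_eq_pairSum]
    have hA : pairSum (PySem.List.pyRange 0 (n : Int)) (gAFn instance_ matching)
        = pairSum (PySem.List.pyRange 0 (n : Int))
            (fun i j => if flagFn instance_ matching i || flagFn instance_ matching j then 1
                        else mutFn instance_ matching i j) := by
      apply pairSum_congr (pyRange_pairwise_lt n)
      intro i j _ _ hij
      simp only [gAFn, flagFn]
      rw [if_neg (by omega : ¬ i = j)]
      simp
    rw [hA, pairSum_flag_split]
    -- closed forms
    rw [floordiv_choose_two n,
        floordiv_choose_two ((PySem.List.pyRange 0 (n : Int)).filter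
          (fun i => !flagFn instance_ matching i)).length,
        pyRange_length n]
    rw [if_neg (show ¬ instance_.length < 2 by omega)]
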